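-- pv_equiv track=rewrite | github.com/seungdori/TradingBoost-Strategy | shared/indicators/_core.py | pivothigh
-- ===== SOURCE A (Python) =====
-- def pivothigh(series, left_bars, right_bars):
--     """
--     PineScript의 ta.pivothigh(source, leftbars, rightbars) 구현.
--
--     PineScript 방식:
--     - 인덱스 i에서 호출 시, i-leftbars 위치를 pivot 후보로 봄
--     - 좌측 비교: series[i-leftbars-leftbars] ~ series[i-leftbars-1]
--     - 우측 비교: series[i-leftbars+1] ~ series[i-leftbars+rightbars]
--     - pivot이 확정되면 인덱스 i에 저장 (i-leftbars의 값)
--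
--     Args:
--         series: 값 리스트
--         left_bars: 좌측 비교 기간
--         right_bars: 우측 비교 기간
--
--     Returns:
--         list: 각 인덱스의 pivot high 값 (없으면 None)
--               인덱스 i의 값은 i-leftbars 위치의 pivot을 나타냄
--     """
--     result = [None] * len(series)
--
--     # i >= left_bars + right_bars 필요 (충분한 데이터)
--     for i in range(left_bars + right_bars, len(series)):
--         # pivot 후보: i - left_bars
--         pivot_idx = i - left_bars
--         current = series[pivot_idx]
--
--         # NaN 체크
--         if current is None or (isinstance(current, float) and current != current):
--             continue
--
--         # 좌측 비교: pivot_idx - left_bars ~ pivot_idx - 1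
--         is_pivot = True
--         for j in range(pivot_idx - left_bars, pivot_idx):
--             if j < 0:
--                 break
--             if series[j] is None:
--                 continue
--             if series[j] >= current:
--                 is_pivot = False
--                 break
--
--         if not is_pivot:
--             continue
--
--         # 우측 비교: pivot_idx + 1 ~ pivot_idx + right_bars
--         for j in range(pivot_idx + 1, min(pivot_idx + right_bars + 1, len(series))):
--             if series[j] is None:
--                 continue
--             if series[j] >= current:
--                 is_pivot = False
--                 break
--
--         if is_pivot:
--             result[i] = current  # i 위치에 저장 (pivot_idx의 값)
--
--     return result
-- ===== SOURCE B (Python) =====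
-- def pivothigh(series, left_bars, right_bars):
--     """Alternative algorithm: precompute each element's nearest >= neighbour on
--     both sides with a monotonic stack, then decide every cell by two index
--     comparisons instead of scanning its windows."""
--     n = len(series)
--
--     def next_ge(vals):
--         # res[p] = smallest k > p with vals[k] is not None and vals[k] >= vals[p], else len(vals)
--         m = len(vals)
--         res = [m] * m
--         stack = []  # indices of a monotonic stack (top at the end)
--         for p in range(m - 1, -1, -1):
--             if vals[p] is None:
--                 continue
--             while stack and vals[stack[-1]] < vals[p]:
--                 stack.pop()
--             if stack:
--                 res[p] = stack[-1]
--             stack.append(p)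
--         return res
--
--     nge = next_ge(series)
--     g = next_ge(series[::-1])
--     # pge[p] = largest k < p with series[k] is not None and series[k] >= series[p], else -1
--     pge = [n - 1 - g[n - 1 - p] for p in range(n)]
--
--     def cell(i):
--         if i < left_bars + right_bars:
--             return None
--         p = i - left_bars
--         cur = series[p]
--         if cur is None:
--             return None
--         if left_bars <= p and pge[p] >= p - left_bars:
--             return None
--         if nge[p] < min(p + right_bars + 1, n):
--             return None
--         return cur
--
--     return [cell(i) for i in range(n)]
-- ===== Notes on version B (the rewrite author's own statement) =====
-- stated objective: alternative
-- what changed: A's per-index flag-and-break window scans are replaced by two monotonic-stack passes computing each element's nearest >= neighbour on both sides, after which every cell is decided by two index comparisons.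
-- outside the precondition, e.g. on pivothigh([2, 0, 0], 1, -2): A returns [0, 2, 0], B returns [0, 2, None]
import Mathlib
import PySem

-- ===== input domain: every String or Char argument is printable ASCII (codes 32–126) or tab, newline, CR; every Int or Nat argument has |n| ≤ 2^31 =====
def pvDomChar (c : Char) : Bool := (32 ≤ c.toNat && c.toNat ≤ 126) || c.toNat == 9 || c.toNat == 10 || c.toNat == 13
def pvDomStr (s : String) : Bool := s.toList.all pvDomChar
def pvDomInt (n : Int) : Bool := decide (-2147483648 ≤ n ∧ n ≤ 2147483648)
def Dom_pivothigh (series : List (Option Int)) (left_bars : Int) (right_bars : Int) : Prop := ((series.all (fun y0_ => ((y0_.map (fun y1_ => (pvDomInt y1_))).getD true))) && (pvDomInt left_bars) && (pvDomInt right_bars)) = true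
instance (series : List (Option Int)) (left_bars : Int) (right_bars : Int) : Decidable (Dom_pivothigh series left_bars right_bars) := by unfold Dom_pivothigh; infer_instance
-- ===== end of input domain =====

-- ===== PORT A =====
-- B replaces A's per-index window scans by monotonic-stack nearest->=-neighbour passes
-- plus O(1) cell checks (a different algorithm, not measured faster on the test inputs);
-- equivalence is proved on non-negative bar counts (Pre_).

-- A's inner left loop: `for j in range(pivot_idx-left, pivot_idx)` with `break` on j < 0
-- or on series[j] >= current, `continue` on None; returns the final is_pivot flag.
def pvLeftScan (series : List (Option Int)) (c : Int) (j stop : Int) : Bool :=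
  if j < stop then
    if j < 0 then true
    else
      match PySem.List.pyGet? series j with
      | some (some v) => if c ≤ v then false else pvLeftScan series c (j + 1) stop
      | _ => pvLeftScan series c (j + 1) stop
  else true
termination_by (stop - j).toNat
decreasing_by all_goals omega

-- A's inner right loop: `for j in range(pivot_idx+1, min(pivot_idx+right+1, len))`.
def pvRightScan (series : List (Option Int)) (c : Int) (j stop : Int) : Bool :=
  if j < stop then
    match PySem.List.pyGet? series j with
    | some (some v) => if c ≤ v then false else pvRightScan series c (j + 1) stop
    | _ => pvRightScan series c (j + 1) stop
  else true
termination_by (stop - j).toNat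
decreasing_by all_goals omega

def pivothigh (series : List (Option Int)) (left_bars : Int) (right_bars : Int) : List (Option Int) :=
  (PySem.List.pyRange (left_bars + right_bars) (series.length : Int) 1).foldl
    (fun result i =>
      let p := i - left_bars
      match PySem.List.pyGet? series p with
      | some (some current) =>
        if pvLeftScan series current (p - left_bars) p then
          if pvRightScan series current (p + 1) (min (p + right_bars + 1) (series.length : Int)) then
            PySem.List.pySetD result i (some current)
          else result
        else result
      | _ => result)
    (List.replicate series.length (none : Option Int))

-- ===== PORT B =====
-- the `while stack and vals[stack[-1]] < vals[p]: stack.pop()` loop of next_ge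
-- (Python's list-as-stack, used only at its top; ported as a cons-list with the top at the head)
def pvNextGeStep (vals : List (Option Int)) (v : Int) (stack : List Int) : List Int :=
  match stack with
  | [] => []
  | k :: rest =>
    match PySem.List.pyGet? vals k with
    | some (some w) => if w < v then pvNextGeStep vals v rest else stack
    | _ => stack

-- next_ge(vals): res[p] = smallest k > p with vals[k] non-None and vals[k] >= vals[p], else len(vals)
def pvNextGe (vals : List (Option Int)) : List Int :=
  ((PySem.List.pyRange ((vals.length : Int) - 1) (-1) (-1)).foldl
    (fun st p =>
      match PySem.List.pyGet? vals p with
      | some (some v) =>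
        let stack' := pvNextGeStep vals v st.2
        let res' := match stack' with
          | k :: _ => PySem.List.pySetD st.1 p k
          | [] => st.1
        (res', p :: stack')
      | _ => st)
    (List.replicate vals.length (vals.length : Int), ([] : List Int))).1

def pvCellB (series : List (Option Int)) (nge pge : List Int) (l r n i : Int) : Option Int :=
  if i < l + r then none
  else
    let p := i - l
    match PySem.List.pyGet? series p with
    | some (some cur) =>
      if l ≤ p && p - l ≤ PySem.List.pyGetD pge p 0 then none
      else if PySem.List.pyGetD nge p 0 < min (p + r + 1) n then none
      else some cur
    | _ => none

def pivothigh_alt (series : List (Option Int)) (left_bars : Int) (right_bars : Int) : List (Option Int) :=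
  let n : Int := (series.length : Int)
  let nge := pvNextGe series
  let g := pvNextGe series.reverse
  let pge := (PySem.List.pyRange 0 n 1).map (fun p => n - 1 - PySem.List.pyGetD g (n - 1 - p) 0)
  (PySem.List.pyRange 0 n 1).map (pvCellB series nge pge left_bars right_bars n)

-- ===== PRECONDITION & SPEC =====
-- Pre_ excludes negative bar counts: they are outside the function's natural domain, and there
-- A variously raises IndexError or returns negative-index-wraparound artefacts.
def Pre_pivothigh (series : List (Option Int)) (left_bars : Int) (right_bars : Int) : Prop :=
  0 ≤ left_bars ∧ 0 ≤ right_bars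
instance (series : List (Option Int)) (left_bars : Int) (right_bars : Int) : Decidable (Pre_pivothigh series left_bars right_bars) := by unfold Pre_pivothigh; infer_instance

def pvWitness_pivothigh : List (Option Int) × Int × Int := ([some 3, some 1, some 4, some 1, some 5], 1, 1)

def Spec_pivothigh (series : List (Option Int)) (left_bars : Int) (right_bars : Int) (out : List (Option Int)) : Prop := out = pivothigh_alt series left_bars right_bars
instance (series : List (Option Int)) (left_bars : Int) (right_bars : Int) (out : List (Option Int)) : Decidable (Spec_pivothigh series left_bars right_bars out) := by unfold Spec_pivothigh; infer_instance

-- ===== CLAIM (what is proved, stated in full; the proofs are below) =====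
def Claim_equal_pivothigh : Prop := ∀ (series : List (Option Int)) (left_bars : Int) (right_bars : Int), Dom_pivothigh series left_bars right_bars → Pre_pivothigh series left_bars right_bars → Spec_pivothigh series left_bars right_bars (pivothigh series left_bars right_bars)

-- ===== LEMMAS AND PROOFS =====


-- the value A writes at output index i (none = no write)
def pvWrite (series : List (Option Int)) (l r i : Int) : Option Int :=
  match PySem.List.pyGet? series (i - l) with
  | some (some c) =>
    if pvLeftScan series c (i - l - l) (i - l) &&
       pvRightScan series c (i - l + 1) (min (i - l + r + 1) (series.length : Int))
    then some c else none
  | _ => none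

theorem pvLeftScan_iff (series : List (Option Int)) (c : Int) :
    ∀ (m : Nat) (a p : Int), 0 ≤ a → (p - a).toNat = m →
    (pvLeftScan series c a p = true ↔
      ∀ k : Int, a ≤ k → k < p → ∀ v, PySem.List.pyGet? series k = some (some v) → v < c) := by
  intro m
  induction m with
  | zero =>
    intro a p ha hm
    rw [pvLeftScan]
    have hpa : p ≤ a := by omega
    simp only [if_neg (by omega : ¬ a < p)]
    constructor
    · intro _ k hk1 hk2; omega
    · intro _; trivial
  | succ n ih =>
    intro a p ha hm
    have hap : a < p := by omega
    rw [pvLeftScan]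
    simp only [if_pos hap, if_neg (by omega : ¬ a < 0)]
    have ihh := ih (a + 1) p (by omega) (by omega)
    cases hg : PySem.List.pyGet? series a with
    | none =>
      simp only [ihh]
      constructor
      · intro h k hk1 hk2 v hv
        rcases eq_or_lt_of_le hk1 with h' | h'
        · rw [← h'] at hv; simp only [hg] at hv; cases hv
        · exact h k (by omega) hk2 v hv
      · intro h k hk1 hk2 v hv; exact h k (by omega) hk2 v hv
    | some o =>
      cases o with
      | none =>
        simp only [ihh]
        constructor
        · intro h k hk1 hk2 v hv
          rcases eq_or_lt_of_le hk1 with h' | h'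
          · rw [← h'] at hv; simp only [hg] at hv; cases hv
          · exact h k (by omega) hk2 v hv
        · intro h k hk1 hk2 v hv; exact h k (by omega) hk2 v hv
      | some v0 =>
        by_cases hcv : c ≤ v0
        · simp only [if_pos hcv]
          constructor
          · intro h; cases h
          · intro h
            have := h a le_rfl hap v0 hg
            omega
        · simp only [if_neg hcv, ihh]
          constructor
          · intro h k hk1 hk2 v hv
            rcases eq_or_lt_of_le hk1 with h' | h'
            · rw [← h'] at hv; simp only [hg] at hv
              cases hv; omega
            · exact h k (by omega) hk2 v hv
          · intro h k hk1 hk2 v hv; exact h k (by omega) hk2 v hv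

theorem pvRightScan_iff (series : List (Option Int)) (c : Int) :
    ∀ (m : Nat) (a p : Int), (p - a).toNat = m →
    (pvRightScan series c a p = true ↔
      ∀ k : Int, a ≤ k → k < p → ∀ v, PySem.List.pyGet? series k = some (some v) → v < c) := by
  intro m
  induction m with
  | zero =>
    intro a p hm
    rw [pvRightScan]
    simp only [if_neg (by omega : ¬ a < p)]
    constructor
    · intro _ k hk1 hk2; omega
    · intro _; trivial
  | succ n ih =>
    intro a p hm
    have hap : a < p := by omega
    rw [pvRightScan]
    simp only [if_pos hap]
    have ihh := ih (a + 1) p (by omega)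
    cases hg : PySem.List.pyGet? series a with
    | none =>
      simp only [ihh]
      constructor
      · intro h k hk1 hk2 v hv
        rcases eq_or_lt_of_le hk1 with h' | h'
        · rw [← h'] at hv; simp only [hg] at hv; cases hv
        · exact h k (by omega) hk2 v hv
      · intro h k hk1 hk2 v hv; exact h k (by omega) hk2 v hv
    | some o =>
      cases o with
      | none =>
        simp only [ihh]
        constructor
        · intro h k hk1 hk2 v hv
          rcases eq_or_lt_of_le hk1 with h' | h'
          · rw [← h'] at hv; simp only [hg] at hv; cases hv
          · exact h k (by omega) hk2 v hv
        · intro h k hk1 hk2 v hv; exact h k (by omega) hk2 v hv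
      | some v0 =>
        by_cases hcv : c ≤ v0
        · simp only [if_pos hcv]
          constructor
          · intro h; cases h
          · intro h
            have := h a le_rfl hap v0 hg
            omega
        · simp only [if_neg hcv, ihh]
          constructor
          · intro h k hk1 hk2 v hv
            rcases eq_or_lt_of_le hk1 with h' | h'
            · rw [← h'] at hv; simp only [hg] at hv
              cases hv; omega
            · exact h k (by omega) hk2 v hv
          · intro h k hk1 hk2 v hv; exact h k (by omega) hk2 v hv

theorem pvStep_eq (series : List (Option Int)) (l r : Int) (res : List (Option Int)) (i : Int) :
    (let p := i - l
     match PySem.List.pyGet? series p with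
     | some (some current) =>
       if pvLeftScan series current (p - l) p then
         if pvRightScan series current (p + 1) (min (p + r + 1) (series.length : Int)) then
           PySem.List.pySetD res i (some current)
         else res
       else res
     | _ => res) =
    (match pvWrite series l r i with
     | some c => PySem.List.pySetD res i (some c)
     | none => res) := by
  unfold pvWrite
  cases hg : PySem.List.pyGet? series (i - l) with
  | none => simp only [hg]
  | some o => cases o with
    | none => simp only [hg]
    | some c =>
      simp only [hg]
      cases hsc : pvLeftScan series c (i - l - l) (i - l) with
      | false => simp
      | true =>
        cases hsr : pvRightScan series c (i - l + 1) (min (i - l + r + 1) (series.length : Int)) with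
        | false => simp
        | true => simp

theorem foldA_length (f : List (Option Int) → Int → List (Option Int)) (series : List (Option Int)) (l r : Int)
    (hf : ∀ res i, f res i = match pvWrite series l r i with
      | some c => PySem.List.pySetD res i (some c) | none => res) :
    ∀ (L : List Int) (res : List (Option Int)), (List.foldl f res L).length = res.length := by
  intro L
  induction L with
  | nil => intro res; rfl
  | cons x t ih =>
    intro res
    rw [List.foldl_cons, ih, hf]
    cases pvWrite series l r x with
    | none => rfl
    | some c => simp [PySem.List.length_pySetD]

theorem foldA_getElem? (f : List (Option Int) → Int → List (Option Int)) (series : List (Option Int)) (l r : Int)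
    (hf : ∀ res i, f res i = match pvWrite series l r i with
      | some c => PySem.List.pySetD res i (some c) | none => res) :
    ∀ (m : Nat) (a : Int), 0 ≤ a → (((series.length : Int)) - a).toNat = m →
    ∀ (res : List (Option Int)), res.length = series.length →
    ∀ (j : Nat), j < series.length →
    (List.foldl f res (PySem.List.pyRange a (series.length : Int) 1))[j]? =
      if a ≤ (j : Int) then
        (match pvWrite series l r (j : Int) with
         | some c => some (some c)
         | none => res[j]?)
      else res[j]? := by
  intro m
  induction m with
  | zero =>
    intro a ha hm res hres j hj
    rw [PySem.List.pyRange_one_eq_nil (by omega)]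
    rw [if_neg (by omega)]
    rfl
  | succ n ih =>
    intro a ha hm res hres j hj
    have hap : a < (series.length : Int) := by omega
    rw [PySem.List.pyRange_one_cons hap, List.foldl_cons]
    have hlen2 : (f res a).length = series.length := by
      rw [hf]
      cases pvWrite series l r a with
      | none => exact hres
      | some c => simp [PySem.List.length_pySetD, hres]
    rw [ih (a + 1) (by omega) (by omega) (f res a) hlen2 j hj]
    by_cases hja : (j : Int) = a
    · -- the step at a writes exactly index j
      rw [if_neg (by omega), if_pos (by omega)]
      rw [hf, ← hja]
      cases hw : pvWrite series l r (j : Int) with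
      | none => rfl
      | some c =>
        dsimp only
        rw [PySem.List.pySetD_of_nonneg (h := by omega)]
        simp only [Int.toNat_natCast]
        rw [List.getElem?_set_self (by omega)]
    · by_cases haj : a ≤ (j : Int)
      · rw [if_pos (by omega), if_pos haj]
        cases hw : pvWrite series l r (j : Int) with
        | none =>
          rw [hf]
          cases hw2 : pvWrite series l r a with
          | none => rfl
          | some c =>
            dsimp only
            rw [PySem.List.pySetD_of_nonneg (h := ha)]
            rw [List.getElem?_set_ne (by omega)]
        | some c => rfl
      · rw [if_neg haj, if_neg (by omega)]
        rw [hf]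
        cases hw2 : pvWrite series l r a with
        | none => rfl
        | some c =>
          dsimp only
          rw [PySem.List.pySetD_of_nonneg (h := ha)]
          rw [List.getElem?_set_ne (by omega)]

theorem pivothigh_getElem? (series : List (Option Int)) (l r : Int) (hl : 0 ≤ l) (hr : 0 ≤ r)
    (j : Nat) (hj : j < series.length) :
    (pivothigh series l r)[j]? =
      if l + r ≤ (j : Int) then
        (match pvWrite series l r (j : Int) with
         | some c => some (some c)
         | none => some none)
      else some none := by
  unfold pivothigh
  have h := foldA_getElem?
    (fun result i =>
      let p := i - l
      match PySem.List.pyGet? series p with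
      | some (some current) =>
        if pvLeftScan series current (p - l) p then
          if pvRightScan series current (p + 1) (min (p + r + 1) (series.length : Int)) then
            PySem.List.pySetD result i (some current)
          else result
        else result
      | _ => result)
    series l r (fun res i => pvStep_eq series l r res i)
    (((series.length : Int) - (l + r)).toNat) (l + r) (by omega) rfl
    (List.replicate series.length (none : Option Int)) (by simp) j hj
  rw [h]
  have hrep : (List.replicate series.length (none : Option Int))[j]? = some none := by
    simp [hj]
  rw [hrep]

theorem pivothigh_length (series : List (Option Int)) (l r : Int) :
    (pivothigh series l r).length = series.length := by
  unfold pivothigh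
  rw [foldA_length _ series l r (fun res i => pvStep_eq series l r res i)]
  simp


def pvVal (vals : List (Option Int)) (k : Int) : Int :=
  match PySem.List.pyGet? vals k with
  | some (some w) => w
  | _ => 0

-- the pop loop is a dropWhile on stacks of non-None indices
theorem pvNextGeStep_eq_dropWhile (vals : List (Option Int)) (v : Int) :
    ∀ (stack : List Int), (∀ k ∈ stack, ∃ w, PySem.List.pyGet? vals k = some (some w)) →
    pvNextGeStep vals v stack = stack.dropWhile (fun k => decide (pvVal vals k < v)) := by
  intro stack
  induction stack with
  | nil => intro _; rfl
  | cons k rest ih =>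
    intro ha
    obtain ⟨w, hw⟩ := ha k (by simp)
    rw [pvNextGeStep, hw, List.dropWhile_cons]
    dsimp only
    have hv : pvVal vals k = w := by unfold pvVal; rw [hw]
    by_cases hlt : w < v
    · rw [if_pos hlt, if_pos (by simp [hv, hlt])]
      exact ih (fun k' hk' => ha k' (by simp [hk']))
    · rw [if_neg hlt, if_neg (by simp [hv, hlt])]

-- stack invariant of next_ge's scan: entries are non-None indices of (p, m),
-- ascending with non-decreasing values, covering every non-None index of (p, m)
def pvInv (vals : List (Option Int)) (p : Int) (stack : List Int) : Prop :=
  (∀ k ∈ stack, p < k ∧ k < (vals.length : Int) ∧ ∃ w, PySem.List.pyGet? vals k = some (some w)) ∧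
  List.Pairwise (fun k1 k2 => k1 < k2 ∧ pvVal vals k1 ≤ pvVal vals k2) stack ∧
  (∀ k' : Int, p < k' → k' < (vals.length : Int) → ∀ w, PySem.List.pyGet? vals k' = some (some w) →
    ∃ k ∈ stack, k ≤ k' ∧ w ≤ pvVal vals k)

theorem pvInv_dropWhile_blocked (vals : List (Option Int)) (p v : Int) (stack : List Int)
    (hInv : pvInv vals p stack) (k' : Int) (hp : p < k') (hm : k' < (vals.length : Int))
    (w : Int) (hw : PySem.List.pyGet? vals k' = some (some w))
    (hlt : ∀ k0 ∈ (stack.dropWhile (fun k => decide (pvVal vals k < v))).head?, k' < k0) :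
    w < v := by
  obtain ⟨ha, hpw, hcov⟩ := hInv
  obtain ⟨k, hk_mem, hk_le, hk_val⟩ := hcov k' hp hm w hw
  -- k is in the takeWhile part: everything in dropWhile is ≥ its head > k'
  rw [← List.takeWhile_append_dropWhile (p := fun k => decide (pvVal vals k < v)) (l := stack)]
    at hk_mem
  rw [List.mem_append] at hk_mem
  cases hk_mem with
  | inl htake =>
    have := List.mem_takeWhile_imp htake
    simp only [decide_eq_true_eq] at this
    omega
  | inr hdrop =>
    -- k ∈ dropWhile, so head ≤ k, but head > k' ≥ k: contradiction
    cases hd : (stack.dropWhile (fun k => decide (pvVal vals k < v))) with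
    | nil => rw [hd] at hdrop; cases hdrop
    | cons k0 rest =>
      have hk0 : k' < k0 := hlt k0 (by rw [hd]; rfl)
      rw [hd] at hdrop
      rcases List.mem_cons.mp hdrop with h | h
      · omega
      · -- k0 < k by pairwise on the dropWhile sublist
        have hsub : List.Pairwise (fun k1 k2 => k1 < k2 ∧ pvVal vals k1 ≤ pvVal vals k2)
            (k0 :: rest) := by
          rw [← hd]
          exact hpw.sublist (List.dropWhile_sublist _)
        have := (List.pairwise_cons.mp hsub).1 k h
        omega

theorem pred_head_dropWhile {α : Type} (p : α → Bool) :
    ∀ (l : List α) (k0 : α) (rest : List α), l.dropWhile p = k0 :: rest → p k0 = false := by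
  intro l
  induction l with
  | nil => intro k0 rest h; cases h
  | cons a t ih =>
    intro k0 rest h
    rw [List.dropWhile_cons] at h
    split at h
    · exact ih k0 rest h
    · cases h
      rename_i hpa
      simpa using hpa

theorem pvGet_lt_length (vals : List (Option Int)) (p : Int) (o : Option Int)
    (hp : 0 ≤ p) (hg : PySem.List.pyGet? vals p = some o) : p < (vals.length : Int) := by
  rw [PySem.List.pyGet?_of_nonneg (h := hp)] at hg
  obtain ⟨hlt, -⟩ := List.getElem?_eq_some_iff.mp hg
  omega

theorem pvInv_push (vals : List (Option Int)) (p v : Int) (stack : List Int)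
    (hInv : pvInv vals p stack) (hp : 0 ≤ p) (hv : PySem.List.pyGet? vals p = some (some v)) :
    pvInv vals (p - 1) (p :: stack.dropWhile (fun k => decide (pvVal vals k < v))) := by
  obtain ⟨ha, hpw, hcov⟩ := hInv
  have hpm : p < (vals.length : Int) := pvGet_lt_length vals p _ hp hv
  have hvalp : pvVal vals p = v := by unfold pvVal; rw [hv]
  have hmemdrop : ∀ k ∈ stack.dropWhile (fun k => decide (pvVal vals k < v)), k ∈ stack :=
    fun k hk => (List.dropWhile_sublist _).mem hk
  refine ⟨?_, ?_, ?_⟩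
  · intro k hk
    rcases List.mem_cons.mp hk with h | h
    · exact ⟨by omega, by omega, v, by rw [h]; exact hv⟩
    · have := ha k (hmemdrop k h)
      exact ⟨by omega, this.2.1, this.2.2⟩
  · rw [List.pairwise_cons]
    constructor
    · intro k hk
      have hk_stack := hmemdrop k hk
      have hk_gt : p < k := (ha k hk_stack).1
      refine ⟨hk_gt, ?_⟩
      rw [hvalp]
      cases hd : stack.dropWhile (fun k => decide (pvVal vals k < v)) with
      | nil => rw [hd] at hk; cases hk
      | cons k0 rest =>
        have hk0 : v ≤ pvVal vals k0 := by
          have := pred_head_dropWhile _ stack k0 rest hd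
          simp only [decide_eq_false_iff_not] at this
          omega
        rw [hd] at hk
        rcases List.mem_cons.mp hk with h | h
        · rw [h]; omega
        · have hsub : List.Pairwise (fun k1 k2 => k1 < k2 ∧ pvVal vals k1 ≤ pvVal vals k2)
              (k0 :: rest) := by
            rw [← hd]; exact hpw.sublist (List.dropWhile_sublist _)
          have := (List.pairwise_cons.mp hsub).1 k h
          omega
    · exact hpw.sublist (List.dropWhile_sublist _)
  · intro k' hk'1 hk'2 w hw
    by_cases hkp : k' = p
    · exact ⟨p, by simp, by omega, by
        rw [hkp] at hw
        rw [hw] at hv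
        cases hv
        rw [hvalp]⟩
    · obtain ⟨k, hk_mem, hk_le, hk_val⟩ := hcov k' (by omega) hk'2 w hw
      rw [← List.takeWhile_append_dropWhile (p := fun k => decide (pvVal vals k < v)) (l := stack)]
        at hk_mem
      rcases List.mem_append.mp hk_mem with h | h
      · have := List.mem_takeWhile_imp h
        simp only [decide_eq_true_eq] at this
        exact ⟨p, by simp, by omega, by rw [hvalp]; omega⟩
      · exact ⟨k, by simp [h], hk_le, hk_val⟩

theorem pvInv_skip (vals : List (Option Int)) (p : Int) (stack : List Int)
    (hInv : pvInv vals p stack) (hnone : PySem.List.pyGet? vals p = some none) :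
    pvInv vals (p - 1) stack := by
  obtain ⟨ha, hpw, hcov⟩ := hInv
  refine ⟨fun k hk => ⟨by have := (ha k hk).1; omega, (ha k hk).2.1, (ha k hk).2.2⟩, hpw, ?_⟩
  intro k' hk'1 hk'2 w hw
  by_cases hkp : k' = p
  · rw [hkp, hnone] at hw; cases hw
  · exact hcov k' (by omega) hk'2 w hw

def pvNgeProps (vals : List (Option Int)) (j : Nat) (v e : Int) : Prop :=
  (j : Int) < e ∧ e ≤ (vals.length : Int) ∧
  (∀ k : Int, (j : Int) < k → k < e → ∀ w, PySem.List.pyGet? vals k = some (some w) → w < v) ∧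
  (e < (vals.length : Int) → ∃ w, PySem.List.pyGet? vals e = some (some w) ∧ v ≤ w)

theorem pvNgeProps_of_state (vals : List (Option Int)) (p v : Int) (stack : List Int)
    (hInv : pvInv vals p stack) (hp : 0 ≤ p) (hpm : p < (vals.length : Int)) :
    pvNgeProps vals p.toNat v
      (match stack.dropWhile (fun k => decide (pvVal vals k < v)) with
       | k0 :: _ => k0
       | [] => (vals.length : Int)) := by
  have hcast : ((p.toNat : Nat) : Int) = p := by omega
  cases hd : stack.dropWhile (fun k => decide (pvVal vals k < v)) with
  | nil =>
    dsimp only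
    refine ⟨by omega, le_refl _, ?_, by omega⟩
    intro k hk1 hk2 w hw
    refine pvInv_dropWhile_blocked vals p v stack hInv k (by omega) (by omega) w hw ?_
    rw [hd]; intro k0 hk0; cases hk0
  | cons k0 rest =>
    have hk0_stack : k0 ∈ stack := (List.dropWhile_sublist _).mem (by rw [hd]; simp)
    obtain ⟨hk0_gt, hk0_lt, w0, hw0⟩ := hInv.1 k0 hk0_stack
    have hk0_val : v ≤ pvVal vals k0 := by
      have := pred_head_dropWhile _ stack k0 rest hd
      simp only [decide_eq_false_iff_not] at this
      omega
    dsimp only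
    refine ⟨by omega, by omega, ?_, ?_⟩
    · intro k hk1 hk2 w hw
      refine pvInv_dropWhile_blocked vals p v stack hInv k (by omega) (by omega) w hw ?_
      rw [hd]; intro k0' hk0'; cases hk0'; omega
    · intro _
      refine ⟨w0, hw0, ?_⟩
      have : pvVal vals k0 = w0 := by unfold pvVal; rw [hw0]
      omega

theorem pvNextGe_fold (vals : List (Option Int)) :
    ∀ (cnt : Nat) (p : Int), p < (vals.length : Int) → (p + 1).toNat = cnt →
    ∀ (res : List Int) (stack : List Int),
    res.length = vals.length →
    pvInv vals p stack →
    (∀ j : Nat, (j : Int) ≤ p → res[j]? = some (vals.length : Int)) →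
    ∀ (j : Nat), j < vals.length →
    (((j : Int) ≤ p →
      (match vals[j]? with
       | some (some v) => ∃ e, ((PySem.List.pyRange p (-1) (-1)).foldl
            (fun st q =>
              match PySem.List.pyGet? vals q with
              | some (some v) =>
                let stack' := pvNextGeStep vals v st.2
                let res' := match stack' with
                  | k :: _ => PySem.List.pySetD st.1 q k
                  | [] => st.1
                (res', q :: stack')
              | _ => st)
            (res, stack)).1[j]? = some e ∧ pvNgeProps vals j v e
       | _ => ((PySem.List.pyRange p (-1) (-1)).foldl
            (fun st q =>
              match PySem.List.pyGet? vals q with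
              | some (some v) =>
                let stack' := pvNextGeStep vals v st.2
                let res' := match stack' with
                  | k :: _ => PySem.List.pySetD st.1 q k
                  | [] => st.1
                (res', q :: stack')
              | _ => st)
            (res, stack)).1[j]? = res[j]?)) ∧
     (p < (j : Int) →
       ((PySem.List.pyRange p (-1) (-1)).foldl
            (fun st q =>
              match PySem.List.pyGet? vals q with
              | some (some v) =>
                let stack' := pvNextGeStep vals v st.2
                let res' := match stack' with
                  | k :: _ => PySem.List.pySetD st.1 q k
                  | [] => st.1
                (res', q :: stack')
              | _ => st)
            (res, stack)).1[j]? = res[j]?)) := by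
  intro cnt
  induction cnt with
  | zero =>
    intro p hpm hcnt res stack hlen hInv hres j hj
    rw [PySem.List.pyRange_neg_one_eq_nil (by omega)]
    constructor
    · intro hjp
      have : (0 : Int) ≤ (j : Int) := by omega
      omega
    · intro _; rfl
  | succ n ih =>
    intro p hpm hcnt res stack hlen hInv hres j hj
    have hp0 : 0 ≤ p := by omega
    rw [PySem.List.pyRange_neg_one_cons (by omega), List.foldl_cons]
    have hget : PySem.List.pyGet? vals p = vals[p.toNat]? := by
      rw [PySem.List.pyGet?_of_nonneg (h := hp0)]
    cases hg : vals[p.toNat]? with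
    | none =>
      exfalso
      rw [List.getElem?_eq_none_iff] at hg
      omega
    | some o =>
      have hgp : PySem.List.pyGet? vals p = some o := by rw [hget, hg]
      cases o with
      | none =>
        -- skipped index: state unchanged
        simp only [hgp]
        have ihh := ih (p - 1) (by omega) (by omega) res stack hlen
          (pvInv_skip vals p stack hInv hgp)
          (fun j' hj' => hres j' (by omega)) j hj
        constructor
        · intro hjp
          by_cases hjp' : (j : Int) ≤ p - 1
          · exact ihh.1 hjp'
          · have hje : (j : Int) = p := by omega
            have hj2 : j = p.toNat := by omega
            have hgj : vals[j]? = some (none : Option Int) := by rw [hj2]; exact hg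
            rw [hgj]
            dsimp only
            exact ihh.2 (by omega)
        · intro hjp
          exact ihh.2 (by omega)
      | some v =>
        simp only [hgp]
        -- pushed index
        have hstep : pvNextGeStep vals v stack
            = stack.dropWhile (fun k => decide (pvVal vals k < v)) :=
          pvNextGeStep_eq_dropWhile vals v stack (fun k hk => (hInv.1 k hk).2.2)
        set D := stack.dropWhile (fun k => decide (pvVal vals k < v)) with hD
        -- the new res
        have hres' :
            (match D with
             | k :: _ => PySem.List.pySetD res p k
             | [] => res).length = vals.length := by
          cases D with
          | nil => exact hlen
          | cons k0 rest => simp [PySem.List.length_pySetD, hlen]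
        have hresj' : ∀ j' : Nat, (j' : Int) ≤ p - 1 →
            (match D with
             | k :: _ => PySem.List.pySetD res p k
             | [] => res)[j']? = some (vals.length : Int) := by
          intro j' hj'
          cases D with
          | nil => exact hres j' (by omega)
          | cons k0 rest =>
            dsimp only
            rw [PySem.List.pySetD_of_nonneg (h := hp0)]
            rw [List.getElem?_set_ne (by omega)]
            exact hres j' (by omega)
        have ihh := ih (p - 1) (by omega) (by omega)
          (match D with
           | k :: _ => PySem.List.pySetD res p k
           | [] => res)
          (p :: D)
          hres'
          (by rw [hD]; exact pvInv_push vals p v stack hInv hp0 hgp)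
          hresj' j hj
        simp only [hstep]
        constructor
        · intro hjp
          by_cases hjp' : (j : Int) ≤ p - 1
          · -- below p: value matches but res-fallback entries must be rewritten back
            have h1 := ihh.1 hjp'
            cases hgj : vals[j]? with
            | none =>
              rw [hgj] at h1
              dsimp only at h1 ⊢
              rw [h1]
              cases D with
              | nil => rfl
              | cons k0 rest =>
                dsimp only
                rw [PySem.List.pySetD_of_nonneg (h := hp0)]
                rw [List.getElem?_set_ne (by omega)]
            | some oj =>
              cases oj with
              | none =>
                rw [hgj] at h1
                dsimp only at h1 ⊢
                rw [h1]
                cases D with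
                | nil => rfl
                | cons k0 rest =>
                  dsimp only
                  rw [PySem.List.pySetD_of_nonneg (h := hp0)]
                  rw [List.getElem?_set_ne (by omega)]
              | some vj =>
                rw [hgj] at h1
                dsimp only at h1 ⊢
                exact h1
          · -- j = p: read the freshly written entry
            have hje : (j : Int) = p := by omega
            have hj2 : j = p.toNat := by omega
            have h2 := ihh.2 (by omega)
            have hgj : vals[j]? = some (some v) := by rw [hj2]; exact hg
            rw [hgj]
            dsimp only
            have hprops := pvNgeProps_of_state vals p v stack hInv hp0 hpm
            rw [← hD] at hprops
            rw [← hj2] at hprops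
            have hx : (match D with
                | k :: _ => PySem.List.pySetD res p k
                | [] => res)[j]? =
                some (match D with | k0 :: _ => k0 | [] => (vals.length : Int)) := by
              cases D with
              | nil => dsimp only; rw [hj2]; exact hres p.toNat (by omega)
              | cons k0 rest =>
                dsimp only
                rw [PySem.List.pySetD_of_nonneg (h := hp0), hj2]
                rw [List.getElem?_set_self (by omega)]
            exact ⟨_, h2.trans hx, hprops⟩
        · intro hjp
          have h2 := ihh.2 (by omega)
          rw [h2]
          cases D with
          | nil => rfl
          | cons k0 rest =>
            dsimp only
            rw [PySem.List.pySetD_of_nonneg (h := hp0)]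
            rw [List.getElem?_set_ne (by omega)]

theorem pvNextGe_spec (vals : List (Option Int)) (j : Nat) (hj : j < vals.length)
    (v : Int) (hv : vals[j]? = some (some v)) :
    ∃ e, (pvNextGe vals)[j]? = some e ∧ pvNgeProps vals j v e := by
  unfold pvNextGe
  have h := pvNextGe_fold vals vals.length ((vals.length : Int) - 1) (by omega) (by omega)
    (List.replicate vals.length (vals.length : Int)) [] (by simp)
    ⟨by simp, by simp, by intro k' h1 h2 w hw; exfalso; omega⟩
    (fun j' hj' => by rw [List.getElem?_replicate, if_pos (by omega)])
    j hj
  have h1 := h.1 (by omega)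
  rw [hv] at h1
  exact h1

theorem pvRevGet (series : List (Option Int)) (k : Nat) (hk : k < series.length) :
    series.reverse[series.length - 1 - k]? = series[k]? := by
  rw [List.getElem?_reverse (by omega)]
  congr 1
  omega

theorem pvCellB_eq_pvWrite (series : List (Option Int)) (l r : Int) (hl : 0 ≤ l) (hr : 0 ≤ r)
    (j : Nat) (hj : j < series.length) :
    pvCellB series (pvNextGe series)
      ((PySem.List.pyRange 0 (series.length : Int) 1).map
        (fun p => (series.length : Int) - 1 -
          PySem.List.pyGetD (pvNextGe series.reverse) ((series.length : Int) - 1 - p) 0))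
      l r (series.length : Int) (j : Int) =
      if l + r ≤ (j : Int) then pvWrite series l r (j : Int) else none := by
  unfold pvCellB pvWrite
  by_cases hgate : (j : Int) < l + r
  · rw [if_pos hgate, if_neg (by omega)]
  · rw [if_neg hgate, if_pos (by omega)]
    cases hg : PySem.List.pyGet? series ((j : Int) - l) with
    | none => simp only [hg]
    | some o =>
      cases o with
      | none => simp only [hg]
      | some cur =>
        simp only [hg]
        have hq : (((j : Int) - l).toNat : Int) = (j : Int) - l := by omega
        set q : Nat := ((j : Int) - l).toNat with hqdef
        have hqm : q < series.length := by omega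
        have hserq : series[q]? = some (some cur) := by
          rw [PySem.List.pyGet?_of_nonneg (h := by omega)] at hg
          exact hg
        obtain ⟨e, he, hp1, hp2, hp3, hp4⟩ := pvNextGe_spec series q hqm cur hserq
        have hnge : PySem.List.pyGetD (pvNextGe series) ((j : Int) - l) 0 = e := by
          rw [← hq, PySem.List.pyGetD_natCast, List.getD_eq_getElem?_getD, he]
          rfl
        -- reversed-side facts
        have hbridge : ∀ (k : Int), 0 ≤ k → k < (series.length : Int) →
            PySem.List.pyGet? series.reverse ((series.length : Int) - 1 - k) =
              PySem.List.pyGet? series k := by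
          intro k h0 hm
          rw [PySem.List.pyGet?_of_nonneg (h := by omega),
              PySem.List.pyGet?_of_nonneg (h := h0)]
          have h1 : ((series.length : Int) - 1 - k).toNat = series.length - 1 - k.toNat := by
            omega
          rw [h1, pvRevGet series k.toNat (by omega)]
        have ht : ((((series.length : Int) - 1 - ((j : Int) - l)).toNat : Nat) : Int)
            = (series.length : Int) - 1 - ((j : Int) - l) := by omega
        set t : Nat := ((series.length : Int) - 1 - ((j : Int) - l)).toNat with htdef
        have htm : t < series.length := by omega
        have hrevq : series.reverse[t]? = some (some cur) := by
          have h1 : t = series.length - 1 - q := by omega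
          rw [h1, pvRevGet series q hqm]
          exact hserq
        obtain ⟨e2, he2, hq1, hq2, hq3, hq4⟩ :=
          pvNextGe_spec series.reverse t (by simpa using htm) cur hrevq
        rw [List.length_reverse] at hq2 hq4
        have hpge : PySem.List.pyGetD
            ((PySem.List.pyRange 0 (series.length : Int) 1).map
              (fun p => (series.length : Int) - 1 -
                PySem.List.pyGetD (pvNextGe series.reverse) ((series.length : Int) - 1 - p) 0))
            ((j : Int) - l) 0 = (series.length : Int) - 1 - e2 := by
          rw [PySem.List.pyGetD_map_pyRange_of_nonneg _ _ _ _ (by omega) (by omega)]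
          congr 1
          rw [← ht, PySem.List.pyGetD_natCast, List.getD_eq_getElem?_getD, he2]
          rfl
        rw [hnge, hpge]
        -- right window: e ≥ bound ↔ the scan passes
        have hRscan : pvRightScan series cur ((j : Int) - l + 1)
            (min ((j : Int) - l + r + 1) (series.length : Int)) = true ↔
            ¬ (e < min ((j : Int) - l + r + 1) (series.length : Int)) := by
          rw [pvRightScan_iff series cur
            ((min ((j : Int) - l + r + 1) (series.length : Int)) - ((j : Int) - l + 1)).toNat
            _ _ rfl]
          constructor
          · intro hPR hE
            obtain ⟨w, hwe, hwge⟩ := hp4 (by omega)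
            have := hPR e (by omega) (by omega) w hwe
            omega
          · intro hE k hk1 hk2 w hw
            exact hp3 k (by omega) (by omega) w hw
        -- left window
        by_cases hlp : l ≤ (j : Int) - l
        · -- full left window: pge position decides the scan
          have hLscan : pvLeftScan series cur ((j : Int) - l - l) ((j : Int) - l) = true ↔
              ¬ ((j : Int) - l - l ≤ (series.length : Int) - 1 - e2) := by
            rw [pvLeftScan_iff series cur
              (((j : Int) - l) - ((j : Int) - l - l)).toNat _ _ (by omega) rfl]
            constructor
            · intro hPL hB
              have he2m : e2 < (series.length : Int) := by omega
              obtain ⟨w, hwe, hwge⟩ := hq4 he2m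
              have hrw : PySem.List.pyGet? series ((series.length : Int) - 1 - e2)
                  = some (some w) := by
                rw [← hbridge ((series.length : Int) - 1 - e2) (by omega) (by omega)]
                have h1 : (series.length : Int) - 1 - ((series.length : Int) - 1 - e2) = e2 := by
                  omega
                rw [h1]
                exact hwe
              have := hPL ((series.length : Int) - 1 - e2) (by omega) (by omega) w hrw
              omega
            · intro hB k hk1 hk2 w hw
              have h0k : 0 ≤ k := by omega
              have hkr : PySem.List.pyGet? series.reverse ((series.length : Int) - 1 - k)
                  = some (some w) := by
                rw [hbridge k h0k (by omega)]
                exact hw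
              exact hq3 ((series.length : Int) - 1 - k) (by omega) (by omega) w hkr
          by_cases hB : (j : Int) - l - l ≤ (series.length : Int) - 1 - e2
          · -- blocked on the left
            have hsc : pvLeftScan series cur ((j : Int) - l - l) ((j : Int) - l) = false := by
              rcases Bool.eq_false_or_eq_true
                  (pvLeftScan series cur ((j : Int) - l - l) ((j : Int) - l)) with h | h
              · rw [hLscan] at h; exact absurd hB h
              · exact h
            rw [if_pos (by simp [hlp, hB]), hsc]
            simp
          · have hsc : pvLeftScan series cur ((j : Int) - l - l) ((j : Int) - l) = true :=
              hLscan.mpr hB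
            rw [if_neg (by simp [hB]), hsc]
            by_cases hE : e < min ((j : Int) - l + r + 1) (series.length : Int)
            · have hsr : pvRightScan series cur ((j : Int) - l + 1)
                  (min ((j : Int) - l + r + 1) (series.length : Int)) = false := by
                rcases Bool.eq_false_or_eq_true (pvRightScan series cur ((j : Int) - l + 1)
                    (min ((j : Int) - l + r + 1) (series.length : Int))) with h | h
                · rw [hRscan] at h; exact absurd hE h
                · exact h
              rw [if_pos (by simpa using hE), hsr]
              simp
            · have hsr := hRscan.mpr hE
              rw [if_neg (by simpa using hE), hsr]
              simp
        · -- truncated left window: A breaks out immediately, B's l ≤ p test fails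
          have hsc : pvLeftScan series cur ((j : Int) - l - l) ((j : Int) - l) = true := by
            rw [pvLeftScan, if_pos (by omega), if_pos (by omega)]
          rw [if_neg (by simp [hlp]), hsc]
          by_cases hE : e < min ((j : Int) - l + r + 1) (series.length : Int)
          · have hsr : pvRightScan series cur ((j : Int) - l + 1)
                (min ((j : Int) - l + r + 1) (series.length : Int)) = false := by
              rcases Bool.eq_false_or_eq_true (pvRightScan series cur ((j : Int) - l + 1)
                  (min ((j : Int) - l + r + 1) (series.length : Int))) with h | h
              · rw [hRscan] at h; exact absurd hE h
              · exact h
            rw [if_pos (by simpa using hE), hsr]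
            simp
          · have hsr := hRscan.mpr hE
            rw [if_neg (by simpa using hE), hsr]
            simp

-- ===== VERDICT (by name: the statement is the Claim_ definition above) =====
theorem pivothigh_spec : Claim_equal_pivothigh := by
  intro series l r _hdom hpre
  obtain ⟨hl, hr⟩ := hpre
  unfold Spec_pivothigh
  apply List.ext_getElem?
  intro j
  by_cases hj : j < series.length
  · rw [pivothigh_getElem? series l r hl hr j hj]
    have hb : (pivothigh_alt series l r)[j]? = some (pvCellB series (pvNextGe series)
        ((PySem.List.pyRange 0 (series.length : Int) 1).map
          (fun p => (series.length : Int) - 1 -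
            PySem.List.pyGetD (pvNextGe series.reverse) ((series.length : Int) - 1 - p) 0))
        l r (series.length : Int) (j : Int)) := by
      unfold pivothigh_alt
      exact PySem.List.getElem?_map_pyRange_zero _ _ _ hj
    rw [hb, pvCellB_eq_pvWrite series l r hl hr j hj]
    by_cases hgate : l + r ≤ (j : Int)
    · rw [if_pos hgate, if_pos hgate]
      cases pvWrite series l r (j : Int) with
      | none => rfl
      | some c => rfl
    · rw [if_neg hgate, if_neg hgate]
  · have h1 : (pivothigh series l r)[j]? = none := by
      rw [List.getElem?_eq_none]
      rw [pivothigh_length]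
      omega
    have h2 : (pivothigh_alt series l r)[j]? = none := by
      rw [List.getElem?_eq_none]
      unfold pivothigh_alt
      rw [List.length_map, PySem.List.length_pyRange_one]
      omega
    rw [h1, h2]
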